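-- pv_equiv track=rewrite | github.com/Olivera2708/Codeforces | #903/prvi.py | odredi
-- ===== SOURCE A (Python) =====
-- def odredi(x, y, duzine):
--     if (provera_slova(x, y)):
--         return -1
--     counter = 0
--     while (counter < duzine[1]):
--         if y in x:
--             return counter
--
--         x += x
--         counter += 1
--     return -1
--
-- def provera_slova(x, y):
--     for slovo in y:
--         if slovo not in x:
--             return True
--     return False
-- ===== SOURCE B (Python) =====
-- def odredi(x, y, duzine):
--     d = duzine[1]
--     if y == "":
--         return 0 if 0 < d else -1
--     if x == "":
--         return -1
--     L = len(x)
--     rep = x * (len(y) // L + 2)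
--     i = rep.find(y)
--     if i == -1:
--         return -1
--     m0 = (i + len(y) + L - 1) // L
--     k = (m0 - 1).bit_length()
--     return k if k < d else -1
-- ===== Notes on version B (the rewrite author's own statement) =====
-- stated objective: alternative
-- what changed: Instead of repeatedly doubling the string and rescanning it (A), B finds the first occurrence of y in one bounded repetition of x and computes the answer in closed form as the bit-length of the minimal number of copies needed, capped by duzine[1].
-- outside the precondition, e.g. on odredi('b', 'a', []): A returns -1, B raises IndexError
import Mathlib
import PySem

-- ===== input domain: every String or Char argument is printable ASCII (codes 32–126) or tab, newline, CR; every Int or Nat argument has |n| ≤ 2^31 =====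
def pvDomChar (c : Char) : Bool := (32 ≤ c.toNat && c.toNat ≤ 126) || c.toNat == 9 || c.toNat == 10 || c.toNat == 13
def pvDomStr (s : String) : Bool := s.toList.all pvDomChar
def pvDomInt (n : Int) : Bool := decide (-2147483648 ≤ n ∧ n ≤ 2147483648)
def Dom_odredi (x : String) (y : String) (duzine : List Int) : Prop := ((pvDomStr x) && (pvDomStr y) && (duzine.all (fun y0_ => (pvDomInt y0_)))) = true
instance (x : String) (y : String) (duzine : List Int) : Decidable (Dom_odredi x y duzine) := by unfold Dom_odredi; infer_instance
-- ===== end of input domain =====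

-- B replaces A's repeated string doubling + rescan by one substring search in a bounded
-- repetition of x plus a closed-form bit-length computation (alternative algorithm).

-- ===== PORT A =====
-- for slovo in y: if slovo not in x: return True / return False
def proveraLoop (x : List Char) : List Char → Bool
  | [] => false
  | c :: rest => if x.contains c = false then true else proveraLoop x rest

def provera_slova (x : String) (y : String) : Bool := proveraLoop x.toList y.toList

-- while counter < duzine[1]: if y in x: return counter; x += x; counter += 1; return -1
def odrediLoop (y : List Char) (d : Int) (x : List Char) (counter : Int) : Int :=
  if _h : counter < d then
    if PySem.Chars.isIn y x then counter
    else odrediLoop y d (x ++ x) (counter + 1)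
  else -1
termination_by (d - counter).toNat
decreasing_by omega

def odredi (x : String) (y : String) (duzine : List Int) : Int :=
  if provera_slova x y then -1
  else odrediLoop y.toList ((PySem.List.pyGet? duzine 1).getD 0) x.toList 0

-- ===== PORT B =====
-- Python int.bit_length for nonnegative n
def bitLength (n : Nat) : Nat :=
  if n = 0 then 0 else bitLength (n / 2) + 1

def odredi_alt (x : String) (y : String) (duzine : List Int) : Int :=
  let d := (PySem.List.pyGet? duzine 1).getD 0
  if y = "" then (if 0 < d then 0 else -1)
  else if x = "" then -1
  else
    let L : Nat := x.toList.length
    let rep : List Char := PySem.List.pyRepeat x.toList ((y.toList.length / L + 2 : Nat) : Int)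
    let i : Int := PySem.Chars.find rep y.toList
    if i = -1 then -1
    else
      let m0 : Nat := (i.toNat + y.toList.length + L - 1) / L
      let k : Nat := bitLength (m0 - 1)
      if (k : Int) < d then (k : Int) else -1

-- ===== PRECONDITION & SPEC =====
-- Pre_ excludes duzine with fewer than two elements: there Python A reads duzine[1] and raises
-- IndexError, except when the alphabet pre-check short-circuits first (then A returns -1 while B,
-- which always reads duzine[1], raises) — see the cite in claim.json.
def Pre_odredi (x : String) (y : String) (duzine : List Int) : Prop := 2 ≤ duzine.length
instance (x : String) (y : String) (duzine : List Int) : Decidable (Pre_odredi x y duzine) := by unfold Pre_odredi; infer_instance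
def pvWitness_odredi : String × String × List Int := ("ab", "ba", [0, 5])

def Spec_odredi (x : String) (y : String) (duzine : List Int) (out : Int) : Prop := out = odredi_alt x y duzine
instance (x : String) (y : String) (duzine : List Int) (out : Int) : Decidable (Spec_odredi x y duzine out) := by unfold Spec_odredi; infer_instance

-- ===== CLAIM (what is proved, stated in full; the proofs are below) =====
def Claim_equal_odredi : Prop := ∀ (x : String) (y : String) (duzine : List Int), Dom_odredi x y duzine → Pre_odredi x y duzine → Spec_odredi x y duzine (odredi x y duzine)

-- ===== LEMMAS AND PROOFS =====

-- x repeated m times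
def xpow (x : List Char) (m : Nat) : List Char := (List.replicate m x).flatten

theorem xpow_zero_lem (x : List Char) : xpow x 0 = [] := rfl

theorem xpow_succ_lem (x : List Char) (m : Nat) : xpow x (m + 1) = x ++ xpow x m := by
  simp [xpow, List.replicate_succ]

theorem xpow_one_lem (x : List Char) : xpow x 1 = x := by simp [xpow]

theorem xpow_add_lem (x : List Char) (a b : Nat) : xpow x (a + b) = xpow x a ++ xpow x b := by
  induction a with
  | zero => simp [xpow_zero_lem]
  | succ a ih =>
      have : a + 1 + b = (a + b) + 1 := by omega
      rw [this, xpow_succ_lem, xpow_succ_lem, ih, List.append_assoc]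

theorem length_xpow (x : List Char) (m : Nat) : (xpow x m).length = m * x.length := by
  induction m with
  | zero => simp [xpow_zero_lem]
  | succ m ih => rw [xpow_succ_lem]; simp [ih]; ring

theorem xpow_prefix_xpow (x : List Char) {a b : Nat} (h : a ≤ b) : xpow x a <+: xpow x b := by
  obtain ⟨k, rfl⟩ := Nat.exists_eq_add_of_le h
  rw [xpow_add_lem]; exact List.prefix_append _ _

theorem mem_xpow {x : List Char} {m : Nat} {c : Char} (h : c ∈ xpow x m) : c ∈ x := by
  rcases List.mem_flatten.mp h with ⟨l, hl, hc⟩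
  rwa [List.eq_of_mem_replicate hl] at hc

-- occurrence of y at position p in xpow x m
def Occ (x y : List Char) (m p : Nat) : Prop := y <+: (xpow x m).drop p

theorem occ_length {x y : List Char} {m p : Nat} (hy : y ≠ []) (h : Occ x y m p) :
    p + y.length ≤ m * x.length := by
  have hlen := h.length_le
  rw [List.length_drop, length_xpow] at hlen
  have : 0 < y.length := List.length_pos_iff.mpr hy
  omega

theorem occ_shift_down {x y : List Char} {m p : Nat} (hy : y ≠ []) (hx : x ≠ [])
    (hp : x.length ≤ p) (h : Occ x y m p) : Occ x y m (p - x.length) := by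
  rcases m with _ | m
  · exfalso
    have := occ_length hy h
    have : 0 < y.length := List.length_pos_iff.mpr hy
    omega
  · -- xpow x (m+1) = x ++ xpow x m
    have hdrop : (xpow x (m+1)).drop p = (xpow x m).drop (p - x.length) := by
      rw [xpow_succ_lem, List.drop_append]
      have : (x.drop p) = [] := List.drop_eq_nil_of_le hp
      simp [this]
    have h1 : y <+: (xpow x m).drop (p - x.length) := by
      have h' : y <+: (xpow x (m+1)).drop p := h
      rwa [hdrop] at h'
    exact h1.trans ((xpow_prefix_xpow x (Nat.le_succ m)).drop _)

theorem occ_reduce {x y : List Char} (hy : y ≠ []) (hx : x ≠ []) :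
    ∀ p m, Occ x y m p → ∃ p', p' < x.length ∧ p' ≤ p ∧ Occ x y m p' := by
  intro p
  induction p using Nat.strong_induction_on with
  | _ p ih =>
    intro m h
    by_cases hp : p < x.length
    · exact ⟨p, hp, le_refl _, h⟩
    · have hL : 0 < x.length := List.length_pos_iff.mpr hx
      have h' := occ_shift_down hy hx (by omega) h
      obtain ⟨p', h1, h2, h3⟩ := ih (p - x.length) (by omega) m h'
      exact ⟨p', h1, by omega, h3⟩

-- transfer an occurrence between two powers of x
theorem occ_transfer {x y : List Char} {m m' p : Nat} (h : Occ x y m p)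
    (hlen : p + y.length ≤ m' * x.length) : Occ x y m' p := by
  by_cases hmm : m ≤ m'
  · exact h.trans ((xpow_prefix_xpow x hmm).drop p)
  · have hpre : xpow x m' <+: xpow x m := xpow_prefix_xpow x (by omega)
    have := List.prefix_of_prefix_length_le h ((hpre.drop p)) ?_
    · exact this
    · rw [List.length_drop, length_xpow]; omega

-- the key characterisation: with rep = xpow x (|y|/|x| + 2) and i = find rep y,
-- y occurs in xpow x m iff i ≥ 0 and i + |y| ≤ m·|x|
theorem main_iff {x y : List Char} (hy : y ≠ []) (hx : x ≠ []) (m : Nat) :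
    PySem.Chars.isIn y (xpow x m) = true ↔
      (0 ≤ PySem.Chars.find (xpow x (y.length / x.length + 2)) y ∧
       (PySem.Chars.find (xpow x (y.length / x.length + 2)) y).toNat + y.length ≤ m * x.length) := by
  set R := y.length / x.length + 2 with hR
  have hL : 0 < x.length := List.length_pos_iff.mpr hx
  have hRL : x.length + y.length ≤ R * x.length := by
    have hdm := Nat.div_add_mod y.length x.length
    have hmlt : y.length % x.length < x.length := Nat.mod_lt _ hL
    have : R * x.length = x.length * (y.length / x.length) + 2 * x.length := by
      rw [hR]; ring
    omega
  constructor
  · intro hin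
    obtain ⟨p, hp⟩ := (PySem.Chars.exists_prefix_drop_iff_isIn y (xpow x m)).mpr hin
    obtain ⟨p', hp'L, _, hocc⟩ := occ_reduce hy hx p m hp
    have hplen : p' + y.length ≤ m * x.length := occ_length hy hocc
    have hoccR : Occ x y R p' := occ_transfer hocc (by omega)
    have hfind0 : 0 ≤ PySem.Chars.find (xpow x R) y := by
      by_contra hneg
      have : PySem.Chars.find (xpow x R) y = -1 := by
        have := PySem.Chars.neg_one_le_find (xpow x R) y; omega
      have hni := (PySem.Chars.find_eq_neg_one_iff (xpow x R) y).mp this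
      exact hni (List.infix_iff_prefix_suffix.mpr ⟨_, hoccR, (List.drop_suffix _ _ : (xpow x R).drop p' <:+ xpow x R)⟩)
    obtain ⟨_, hmin⟩ := PySem.Chars.find_spec hfind0
    have hle : (PySem.Chars.find (xpow x R) y).toNat ≤ p' := by
      by_contra hgt
      exact hmin p' (by omega) hoccR
    exact ⟨hfind0, by omega⟩
  · rintro ⟨hge, hlen⟩
    obtain ⟨hocc, _⟩ := PySem.Chars.find_spec hge
    have : Occ x y m (PySem.Chars.find (xpow x R) y).toNat := occ_transfer hocc hlen
    exact (PySem.Chars.exists_prefix_drop_iff_isIn y (xpow x m)).mp ⟨_, this⟩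

-- bitLength facts
theorem lt_two_pow_bitLength (n : Nat) : n < 2 ^ bitLength n := by
  induction n using Nat.strong_induction_on with
  | _ n ih =>
    rw [bitLength]
    by_cases h : n = 0
    · simp [h]
    · have := ih (n / 2) (by omega)
      simp only [h, if_false, pow_succ]
      omega

theorem bitLength_le {n k : Nat} (h : n < 2 ^ k) : bitLength n ≤ k := by
  induction k generalizing n with
  | zero => rw [bitLength]; simp at h; simp [h]
  | succ k ih =>
      rw [bitLength]
      by_cases h0 : n = 0
      · simp [h0]
      · simp only [h0, if_false]
        have : n / 2 < 2 ^ k := by rw [pow_succ] at h; omega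
        have := ih this
        omega

theorem bitLength_le_iff {n k : Nat} : bitLength n ≤ k ↔ n < 2 ^ k := by
  constructor
  · intro h
    exact lt_of_lt_of_le (lt_two_pow_bitLength n) (Nat.pow_le_pow_right (by omega) h)
  · exact bitLength_le

-- ceiling division bridge
theorem ceil_div_le_iff {a L t : Nat} (hL : 0 < L) : (a + L - 1) / L ≤ t ↔ a ≤ t * L := by
  rw [Nat.div_le_iff_le_mul_add_pred hL]
  have : L * t = t * L := Nat.mul_comm _ _
  generalize t * L = u at *
  omega

-- A's loop when the condition never holds
theorem loop_neg {y : List Char} {d : Int} {x : List Char}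
    (hcond : ∀ m : Nat, PySem.Chars.isIn y (xpow x m) = false) :
    ∀ (e c : Nat), ∀ (ci : Int), ci = (c : Int) → (d - ci).toNat ≤ e →
      odrediLoop y d (xpow x (2 ^ c)) ci = -1 := by
  intro e
  induction e with
  | zero =>
      intro c ci hci he
      rw [odrediLoop]
      have : ¬ ci < d := by omega
      simp [this]
  | succ e ih =>
      intro c ci hci he
      rw [odrediLoop]
      by_cases hlt : ci < d
      · have hdd : xpow x (2 ^ c) ++ xpow x (2 ^ c) = xpow x (2 ^ (c + 1)) := by
          rw [← xpow_add_lem]; congr 1; omega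
        rw [dif_pos hlt, if_neg (by simp [hcond (2 ^ c)]), hdd]
        exact ih (c + 1) (ci + 1) (by omega) (by omega)
      · rw [dif_neg hlt]

-- A's loop when the condition is "k0 ≤ counter"
theorem loop_pos {y : List Char} {d : Int} {x : List Char} {k0 : Nat}
    (hcond : ∀ k : Nat, PySem.Chars.isIn y (xpow x (2 ^ k)) = true ↔ k0 ≤ k) :
    ∀ (e c : Nat), ∀ (ci : Int), ci = (c : Int) → (d - ci).toNat ≤ e →
      odrediLoop y d (xpow x (2 ^ c)) ci =
        if (max c k0 : Nat) < d then ((max c k0 : Nat) : Int) else -1 := by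
  intro e
  induction e with
  | zero =>
      intro c ci hci he
      rw [odrediLoop]
      have h1 : ¬ ci < d := by omega
      have h2 : ¬ ((max c k0 : Nat) : Int) < d := by
        have : (c : Int) ≤ ((max c k0 : Nat) : Int) := by
          have := Nat.le_max_left c k0; omega
        omega
      rw [dif_neg h1, if_neg h2]
  | succ e ih =>
      intro c ci hci he
      rw [odrediLoop]
      by_cases hlt : ci < d
      · by_cases hk : k0 ≤ c
        · rw [dif_pos hlt, if_pos ((hcond c).mpr hk)]
          have hm : max c k0 = c := Nat.max_eq_left hk
          rw [hm, if_pos (by omega)]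
          omega
        · have hF : PySem.Chars.isIn y (xpow x (2 ^ c)) = false := by
            rcases Bool.eq_false_or_eq_true (PySem.Chars.isIn y (xpow x (2 ^ c))) with h | h
            · exact absurd ((hcond c).mp h) hk
            · exact h
          have hdd : xpow x (2 ^ c) ++ xpow x (2 ^ c) = xpow x (2 ^ (c + 1)) := by
            rw [← xpow_add_lem]; congr 1; omega
          rw [dif_pos hlt, if_neg (by simp [hF]), hdd, ih (c + 1) (ci + 1) (by omega) (by omega)]
          have hm1 : max (c + 1) k0 = k0 := Nat.max_eq_right (by omega)
          have hm2 : max c k0 = k0 := Nat.max_eq_right (by omega)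
          rw [hm1, hm2]
      · have h2 : ¬ ((max c k0 : Nat) : Int) < d := by
          have h3 : ¬ k0 ≤ c - 1 ∨ True := Or.inr trivial
          have hc : (c : Int) ≥ d := by omega
          have := Nat.le_max_left c k0
          omega
        rw [dif_neg hlt, if_neg h2]

-- provera_slova characterisation
theorem provera_iff (x : List Char) : ∀ y : List Char,
    proveraLoop x y = true ↔ ∃ c ∈ y, x.contains c = false := by
  intro y
  induction y with
  | nil => simp [proveraLoop]
  | cons c rest ih =>
      rw [proveraLoop]
      by_cases h : x.contains c = false
      · simp [ih]
      · have h' : x.contains c = true := by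
          rcases Bool.eq_false_or_eq_true (x.contains c) with h1 | h1
          · exact h1
          · exact absurd h1 h
        simp [ih]

theorem le_iff_sub_one_lt {m t : Nat} (ht : 1 ≤ t) : m ≤ t ↔ m - 1 < t := by omega

theorem toList_ne_nil {s : String} (h : s ≠ "") : s.toList ≠ [] := by
  intro hnil
  exact h (by rwa [← String.toList_eq_nil_iff])

-- ===== VERDICT (by name: the statement is the Claim_ definition above) =====
theorem odredi_spec : Claim_equal_odredi := by
  intro x y duzine _hdom _hpre
  unfold Spec_odredi odredi odredi_alt
  set d : Int := (PySem.List.pyGet? duzine 1).getD 0 with hd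
  by_cases hy : y = ""
  · -- empty y: provera is false, first loop test succeeds
    subst hy
    have hpl : provera_slova x "" = false := by simp [provera_slova, proveraLoop]
    rw [odrediLoop]
    by_cases h0 : (0 : Int) < d
    · simp [hpl, h0, PySem.Chars.isIn_nil]
    · simp [hpl, h0]
  · by_cases hx : x = ""
    · -- empty x, nonempty y: provera is true
      have hyl := toList_ne_nil hy
      have hpl : provera_slova x y = true := by
        unfold provera_slova
        rcases List.exists_cons_of_ne_nil hyl with ⟨c, rest, hcr⟩
        rw [hcr]
        simp [proveraLoop, hx]
      rw [if_pos hpl, if_neg hy, if_pos hx]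
    · -- both nonempty
      have hyl := toList_ne_nil hy
      have hxl := toList_ne_nil hx
      have hL : 0 < x.toList.length := List.length_pos_iff.mpr hxl
      rw [if_neg hy, if_neg hx]
      have hrep : PySem.List.pyRepeat x.toList ((y.toList.length / x.toList.length + 2 : Nat) : Int)
          = xpow x.toList (y.toList.length / x.toList.length + 2) := rfl
      dsimp only
      rw [hrep]
      set i : Int := PySem.Chars.find (xpow x.toList (y.toList.length / x.toList.length + 2)) y.toList with hi
      by_cases hprov : provera_slova x y = true
      · -- a letter of y is missing from x: A returns -1; B's find fails
        rw [if_pos hprov]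
        obtain ⟨c, hcy, hcx⟩ := (provera_iff x.toList y.toList).mp hprov
        have hfind : i = -1 := by
          by_contra hne
          have hinf := (PySem.Chars.find_ne_neg_one_iff _ _).mp (by rw [hi] at hne; exact hne)
          have hcmem : c ∈ xpow x.toList (y.toList.length / x.toList.length + 2) :=
            hinf.sublist.subset hcy
          have hcm : x.toList.contains c = true := List.contains_iff_mem.mpr (mem_xpow hcmem)
          rw [hcx] at hcm
          exact Bool.false_ne_true hcm
        rw [if_pos hfind]
      · -- all letters present: compare loop with closed form
        rw [if_neg hprov]
        have hstart : x.toList = xpow x.toList (2 ^ 0) := (xpow_one_lem _).symm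
        by_cases hfind : i = -1
        · -- y never occurs in any power of x
          rw [if_pos hfind]
          have hnever : ∀ m : Nat, PySem.Chars.isIn y.toList (xpow x.toList m) = false := by
            intro m
            rcases Bool.eq_false_or_eq_true (PySem.Chars.isIn y.toList (xpow x.toList m)) with h | h
            · exfalso
              have := ((main_iff hyl hxl m).mp h).1
              rw [← hi] at this
              omega
            · exact h
          rw [hstart]
          exact loop_neg hnever (d - 0).toNat 0 0 rfl (by omega)
        · rw [if_neg hfind]
          have hge : 0 ≤ i := by
            have := PySem.Chars.neg_one_le_find (xpow x.toList (y.toList.length / x.toList.length + 2)) y.toList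
            rw [← hi] at this
            omega
          set m0 : Nat := (i.toNat + y.toList.length + x.toList.length - 1) / x.toList.length with hm0
          set k0 : Nat := bitLength (m0 - 1) with hk0
          have hcond : ∀ k : Nat, PySem.Chars.isIn y.toList (xpow x.toList (2 ^ k)) = true ↔ k0 ≤ k := by
            intro k
            rw [main_iff hyl hxl (2 ^ k), ← hi]
            constructor
            · rintro ⟨_, hlen⟩
              rw [hk0, bitLength_le_iff]
              have hm0le : m0 ≤ 2 ^ k := by
                rw [hm0]
                exact (ceil_div_le_iff hL).mpr hlen
              exact (le_iff_sub_one_lt Nat.one_le_two_pow).mp hm0le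
            · intro hkk
              refine ⟨hge, ?_⟩
              have hbl : bitLength (m0 - 1) ≤ k := by rw [← hk0]; exact hkk
              have hlt : m0 - 1 < 2 ^ k := bitLength_le_iff.mp hbl
              have hm0le : m0 ≤ 2 ^ k := (le_iff_sub_one_lt Nat.one_le_two_pow).mpr hlt
              exact (ceil_div_le_iff hL).mp (by rw [← hm0]; exact hm0le)
          rw [hstart, loop_pos hcond (d - 0).toNat 0 0 rfl (by omega)]
          have : max 0 k0 = k0 := Nat.max_eq_right (Nat.zero_le _)
          rw [this]
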